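-- pv_equiv track=rewrite | github.com/louisun/iSearch | iSearch/parser.py | deal_word_group
-- ===== SOURCE A (Python) =====
-- def deal_word_group(wlist):
--     word_group_list = []
--     for i, x in enumerate(wlist):
--         if i % 2:
--             word_group_list[len(word_group_list) - 1] = word_group_list[len(word_group_list) - 1] + ' ' + x
--         else:
--             word_group_list.append(x)
--
--     return word_group_list
-- ===== SOURCE B (Python) =====
-- def deal_word_group(wlist):
--     return [' '.join(wlist[i:i + 2]) for i in range(0, len(wlist), 2)]
-- ===== Notes on version B (the rewrite author's own statement) =====
-- stated objective: idiomatic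
-- what changed: B builds each group directly by striding over even indices and joining the two-element slice wlist[i:i+2], instead of A's per-element parity branch that appends and then mutates the last stored element.
import Mathlib
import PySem

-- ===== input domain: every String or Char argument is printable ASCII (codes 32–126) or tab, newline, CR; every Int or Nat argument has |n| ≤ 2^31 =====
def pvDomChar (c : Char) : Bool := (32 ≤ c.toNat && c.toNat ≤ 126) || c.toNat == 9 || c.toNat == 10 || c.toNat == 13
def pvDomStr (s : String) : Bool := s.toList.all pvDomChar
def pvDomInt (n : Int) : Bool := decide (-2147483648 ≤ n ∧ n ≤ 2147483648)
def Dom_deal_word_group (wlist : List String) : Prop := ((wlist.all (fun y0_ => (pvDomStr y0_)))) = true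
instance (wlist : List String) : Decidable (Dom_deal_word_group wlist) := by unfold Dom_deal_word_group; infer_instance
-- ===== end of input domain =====

-- B builds each group directly by striding over even indices and joining the two-element
-- slice wlist[i:i+2] (idiomatic), instead of A's per-element parity branch that appends
-- and then mutates the last stored element.

-- ===== PORT A =====
-- the read of word_group_list[len-1] is ported with pyGetD and default "": the index is in
-- range whenever that branch runs (the odd branch always follows an append), so the default
-- is never used and the port is exact
def deal_word_group (wlist : List String) : List String :=
  (PySem.List.enumerate wlist 0).foldl
    (fun acc p =>
      if p.1 % 2 ≠ 0 then
        acc.set (acc.length - 1)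
          (PySem.List.pyGetD acc ((acc.length : Int) - 1) "" ++ " " ++ p.2)
      else acc ++ [p.2]) []

-- ===== PORT B =====
def deal_word_group_alt (wlist : List String) : List String :=
  (PySem.List.pyRange 0 (wlist.length : Int) 2).map
    (fun i => PySem.Str.join " " (PySem.List.slice wlist (some i) (some (i + 2))))

-- ===== PRECONDITION & SPEC =====
def Spec_deal_word_group (wlist : List String) (out : List String) : Prop := out = deal_word_group_alt wlist
instance (wlist : List String) (out : List String) : Decidable (Spec_deal_word_group wlist out) := by unfold Spec_deal_word_group; infer_instance

-- ===== CLAIM (what is proved, stated in full; the proofs are below) =====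
def Claim_equal_deal_word_group : Prop := ∀ (wlist : List String), Dom_deal_word_group wlist → Spec_deal_word_group wlist (deal_word_group wlist)

-- ===== LEMMAS AND PROOFS =====

/-- Common reference form of both programs: join consecutive pairs with a space. -/
def pvChunks : List String → List String
  | [] => []
  | [a] => [a]
  | a :: b :: rest => (a ++ " " ++ b) :: pvChunks rest

lemma pv_join_pair (a b : String) : PySem.Str.join " " [a, b] = a ++ " " ++ b := by
  simp only [PySem.Str.join, List.map, PySem.Chars.join_cons_cons, PySem.Chars.join_singleton]
  rw [show (" ".toList : List Char) = [' '] from rfl, String.ofList_append, String.ofList_append,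
      String.ofList_toList, String.ofList_toList, show String.ofList [' '] = " " from rfl]

lemma pv_join_single (a : String) : PySem.Str.join " " [a] = a := by
  simp [PySem.Str.join, PySem.Chars.join_singleton, String.ofList_toList]

lemma pv_A_loop (xs : List String) : ∀ (k : Int), k % 2 = 0 → ∀ (acc : List String),
    (PySem.List.enumerate xs k).foldl
      (fun acc p =>
        if p.1 % 2 ≠ 0 then
          acc.set (acc.length - 1)
            (PySem.List.pyGetD acc ((acc.length : Int) - 1) "" ++ " " ++ p.2)
        else acc ++ [p.2]) acc = acc ++ pvChunks xs := by
  induction xs using pvChunks.induct with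
  | case1 => intro k _ acc; simp [PySem.List.enumerate, pvChunks]
  | case2 a => intro k hk acc
               simp [PySem.List.enumerate, pvChunks, hk]
  | case3 a b rest ih =>
      intro k hk acc
      simp only [PySem.List.enumerate_cons, List.foldl_cons]
      rw [if_neg (show ¬((k, a).1 % 2 ≠ 0) by simp; omega),
          if_pos (show ((k + 1, b).1 % 2 ≠ 0) by simp; omega)]
      have h1 : ((acc ++ [a]).length : Int) - 1 = ((acc.length : Nat) : Int) := by simp
      have h2 : (acc ++ [a]).length - 1 = acc.length := by simp
      rw [h1, h2, PySem.List.pyGetD_natCast]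
      simp only [List.getD_append_right, le_refl, Nat.sub_self, List.getD_cons_zero]
      have h3 : (acc ++ [a]).set acc.length (a ++ " " ++ b) = acc ++ [a ++ " " ++ b] := by simp
      rw [h3, ih (k + 1 + 1) (by omega)]
      simp [pvChunks]

lemma pv_range_two_cons (a b : Int) (h : a < b) :
    PySem.List.pyRange a b 2 = a :: PySem.List.pyRange (a + 2) b 2 := by
  rw [PySem.List.pyRange_of_pos a b (show (0:Int) < 2 by norm_num),
      PySem.List.pyRange_of_pos (a+2) b (show (0:Int) < 2 by norm_num)]
  by_cases h2 : a + 2 < b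
  · rw [if_pos h, if_pos h2]
    have hc : ((b - a + 2 - 1) / 2).toNat = ((b - (a + 2) + 2 - 1) / 2).toNat + 1 := by omega
    rw [hc, List.range_succ_eq_map]
    simp only [List.map_cons, List.map_map]
    congr 1
    · simp
    · apply List.map_congr_left
      intro k _
      simp only [Function.comp]
      push_cast; ring
  · rw [if_pos h, if_neg h2]
    have hc : ((b - a + 2 - 1) / 2).toNat = 1 := by omega
    rw [hc]
    simp

lemma pv_range_two_shift (a b : Int) :
    PySem.List.pyRange (a + 2) (b + 2) 2 = (PySem.List.pyRange a b 2).map (· + 2) := by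
  rw [PySem.List.pyRange_of_pos (a+2) (b+2) (show (0:Int) < 2 by norm_num),
      PySem.List.pyRange_of_pos a b (show (0:Int) < 2 by norm_num)]
  by_cases h : a < b
  · rw [if_pos (by omega : a + 2 < b + 2), if_pos h]
    have hc : b + 2 - (a + 2) = b - a := by ring
    rw [hc, List.map_map]
    apply List.map_congr_left
    intro k _; simp only [Function.comp]; ring
  · rw [if_neg (by omega : ¬ (a + 2 < b + 2)), if_neg h]; simp

lemma pv_B_loop (xs : List String) :
    (PySem.List.pyRange 0 (xs.length : Int) 2).map
      (fun i => PySem.Str.join " " (PySem.List.slice xs (some i) (some (i + 2)))) = pvChunks xs := by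
  induction xs using pvChunks.induct with
  | case1 =>
      rw [PySem.List.pyRange_of_pos 0 _ (show (0:Int) < 2 by norm_num)]
      simp [pvChunks]
  | case2 a =>
      rw [show ((([a] : List String).length : Int)) = 1 by simp,
          pv_range_two_cons 0 1 (by norm_num),
          PySem.List.pyRange_of_pos (0+2) 1 (show (0:Int) < 2 by norm_num)]
      rw [if_neg (by norm_num)]
      simp only [List.range_zero, List.map_nil, List.map_cons, zero_add]
      rw [PySem.List.slice_toNat _ (by norm_num) (by norm_num),
          show (Int.toNat 2 - Int.toNat 0) = 2 from rfl, show (Int.toNat 0) = 0 from rfl]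
      simp [pv_join_single, pvChunks]
  | case3 a b rest ih =>
      have hlen : (((a :: b :: rest).length : Int)) = (rest.length : Int) + 2 := by
        simp; ring
      rw [hlen, pv_range_two_cons 0 ((rest.length : Int) + 2) (by positivity),
          show (0 : Int) + 2 = 0 + 2 by ring, pv_range_two_shift 0 (rest.length : Int)]
      simp only [List.map_cons, List.map_map, zero_add]
      rw [PySem.List.slice_toNat _ (by norm_num) (by norm_num),
          show (Int.toNat 2 - Int.toNat 0) = 2 from rfl, show (Int.toNat 0) = 0 from rfl]
      simp only [List.drop_zero, List.take_succ_cons, List.take_zero]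
      rw [pv_join_pair]
      have hmap : ∀ i ∈ PySem.List.pyRange 0 (rest.length : Int) 2,
          ((fun i => PySem.Str.join " " (PySem.List.slice (a :: b :: rest) (some i) (some (i + 2)))) ∘ (· + 2)) i
          = PySem.Str.join " " (PySem.List.slice rest (some i) (some (i + 2))) := by
        intro i hi
        have hi0 : 0 ≤ i := by
          have hmem := (PySem.List.mem_pyRange_iff_of_pos (show (0:Int) < 2 by norm_num) i).1 hi
          omega
        simp only [Function.comp]
        rw [PySem.List.slice_toNat _ (by omega) (by omega),
            PySem.List.slice_toNat _ (by omega) (by omega),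
            show (i + 2).toNat = i.toNat + 2 by omega,
            show (i + 2 + 2).toNat = i.toNat + 4 by omega,
            show i.toNat + 4 - (i.toNat + 2) = 2 by omega,
            show i.toNat + 2 - i.toNat = 2 by omega]
        congr 1
      rw [List.map_congr_left hmap, ih]
      simp [pvChunks]

-- ===== VERDICT (by name: the statement is the Claim_ definition above) =====
theorem deal_word_group_spec : Claim_equal_deal_word_group := by
  intro wlist _
  unfold Spec_deal_word_group deal_word_group deal_word_group_alt
  rw [pv_B_loop, pv_A_loop wlist 0 (by norm_num) []]
  simp
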